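-- pv_equiv track=rewrite | github.com/younghu-kim/xi-bundle-gl2 | scripts/elliptic_curve_gl2_45.py | compute_an_table
-- ===== SOURCE A (Python) =====
-- def compute_ap_37a1(p):
--     """
--     aₚ for 37a1: y² + y = x³ - x
--
--     p=37 (bad prime, nonsplit multiplicative): a₃₇ = -1
--     p=2: 직접 열거
--     p≠2,37 (good odd prime): Legendre 기호
--         변환: (2y+1)² = 4x³ - 4x + 1
--         disc(x) = 4x³ - 4x + 1
--         aₚ = -Σ_{x=0}^{p-1} legendre(disc(x), p)
--     """
--     if p == 37:
--         return -1  # nonsplit multiplicative reduction (ε=-1)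
--
--     if p == 2:
--         # 직접 열거: y² + y = x³ - x (mod 2)
--         count_pts = 1  # point at infinity
--         for x in range(2):
--             for y in range(2):
--                 if (y * y + y - x * x * x + x) % 2 == 0:
--                     count_pts += 1
--         return p + 1 - count_pts
--
--     # 홀수 good prime: Legendre 기호
--     # disc(x) = 4x³ - 4x + 1
--     affine_count = 0
--     for x in range(p):
--         disc = (4 * x * x * x - 4 * x + 1) % p
--         if disc == 0:
--             affine_count += 1
--         else:
--             leg = pow(disc, (p - 1) // 2, p)
--             if leg == 1:
--                 affine_count += 2
--
--     return p - affine_count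
--
-- def compute_an_table(n_max):
--     """aₙ (n=1..n_max) via multiplicativity."""
--     sieve = [True] * (n_max + 1)
--     sieve[0] = sieve[1] = False
--     for i in range(2, int(n_max**0.5) + 1):
--         if sieve[i]:
--             for j in range(i * i, n_max + 1, i):
--                 sieve[j] = False
--     primes = [i for i in range(2, n_max + 1) if sieve[i]]
--
--     ap = {}
--     for p in primes:
--         ap[p] = compute_ap_37a1(p)
--
--     apk = {}
--     for p in primes:
--         apk[(p, 0)] = 1
--         apk[(p, 1)] = ap[p]
--         pk = p
--         k = 1
--         while pk * p <= n_max: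
--             pk *= p
--             k += 1
--             if p == 37:
--                 # bad prime: a_{p^k} = aₚ^k
--                 apk[(p, k)] = ap[p] ** k
--             else:
--                 # good prime: a_{p^k} = aₚ·a_{p^{k-1}} - p·a_{p^{k-2}}
--                 apk[(p, k)] = ap[p] * apk[(p, k - 1)] - p * apk[(p, k - 2)]
--
--     an = [0] * (n_max + 1)
--     an[1] = 1
--     for n in range(2, n_max + 1):
--         temp = n
--         result = 1
--         for p in primes:
--             if p * p > temp:
--                 break
--             if temp % p == 0:
--                 k = 0
--                 while temp % p == 0:
--                     k += 1
--                     temp //= p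
--                 result *= apk[(p, k)]
--         if temp > 1:
--             result *= ap[temp]
--         an[n] = result
--
--     return an
-- ===== SOURCE B (Python) =====
-- def ap_37a1(p):
--     """a_p for 37a1 (y^2 + y = x^3 - x) as a signed character sum."""
--     if p == 37:
--         return -1
--     if p == 2:
--         pts = 1 + sum(1 for x in range(2) for y in range(2)
--                       if (y * y + y - x * x * x + x) % 2 == 0)
--         return 3 - pts
--     s = 0
--     for x in range(p):
--         d = (4 * x * x * x - 4 * x + 1) % p
--         if d != 0:
--             s += 1 if pow(d, (p - 1) // 2, p) == 1 else -1
--     return -s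
--
-- def compute_an_table(n_max):
--     """a_n (n=1..n_max) by a single DP on the an array: a smallest-factor
--     table from per-n trial division, a_p at primes, the Hecke recurrence at
--     prime powers, multiplicativity everywhere else."""
--     an = [0] * (n_max + 1)
--     an[1] = 1
--     spf = [0] * (n_max + 1)
--     for n in range(2, n_max + 1):
--         d = 2
--         while d * d <= n and n % d != 0:
--             d += 1
--         spf[n] = d if d * d <= n else n
--     for n in range(2, n_max + 1):
--         p = spf[n]
--         q, m = p, n // p
--         while m % p == 0:
--             q *= p
--             m //= p
--         if m > 1:
--             an[n] = an[q] * an[m]            # gcd(q, m) = 1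
--         elif q == p:
--             an[n] = ap_37a1(p)               # n = p prime
--         elif p == 37:
--             an[n] = -an[n // 37]             # a_{37^k} = -a_{37^{k-1}}
--         else:
--             an[n] = an[p] * an[n // p] - p * an[n // p // p]
--     return an
-- ===== Notes on version B (the rewrite author's own statement) =====
-- stated objective: alternative
-- what changed: B drops A's boolean sieve, a_p dict, prime-power dict and per-n trial division over the prime list; it builds a smallest-factor table by per-n trial division and fills an[] in one DP pass using a_p at primes, the Hecke recurrence at prime powers, and multiplicativity an[n]=an[q]*an[m] elsewhere; a_p itself is computed as a signed character sum instead of an affine point count.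
-- outside the precondition, e.g. on compute_an_table(0): A raises IndexError, B raises IndexError
import Mathlib
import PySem

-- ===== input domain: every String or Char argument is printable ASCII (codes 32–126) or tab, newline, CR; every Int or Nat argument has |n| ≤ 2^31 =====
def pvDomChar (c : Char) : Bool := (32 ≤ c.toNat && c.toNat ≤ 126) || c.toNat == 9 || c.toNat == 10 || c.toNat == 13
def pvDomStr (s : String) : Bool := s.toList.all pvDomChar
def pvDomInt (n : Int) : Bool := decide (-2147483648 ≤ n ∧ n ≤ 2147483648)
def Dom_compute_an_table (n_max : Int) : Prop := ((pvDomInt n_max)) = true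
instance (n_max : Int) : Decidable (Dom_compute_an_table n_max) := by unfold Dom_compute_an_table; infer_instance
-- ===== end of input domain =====

-- B replaces A's boolean sieve / a_p dict / prime-power dict / per-n trial division
-- over the prime list by a smallest-factor table from per-n trial division and one
-- DP pass over an[] (a_p at primes, Hecke recurrence at prime powers, an[n]=an[q]*an[m]
-- elsewhere); a_p itself is a signed character sum instead of an affine point count.

-- ===== PORT A =====

-- compute_ap_37a1; pow(disc, (p-1)//2, p) is PySem.Int.powMod
def pvApFun (p : Nat) : Int :=
  if p = 37 then -1
  else if p = 2 then
    let cnt : Int := (List.range 2).foldl (fun (c : Int) (x : Nat) =>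
      (List.range 2).foldl (fun (c : Int) (y : Nat) =>
      if PySem.Int.mod ((y : Int) * y + y - (x : Int) * x * x + x) 2 = 0 then c + 1 else c) c) 1
    (p : Int) + 1 - cnt
  else
    let aff : Int := (List.range p).foldl (fun (ac : Int) (x : Nat) =>
      let disc := PySem.Int.mod (4 * (x : Int) * x * x - 4 * x + 1) (p : Int)
      if disc = 0 then ac + 1
      else if PySem.Int.powMod disc ((p - 1) / 2) (p : Int) = 1 then ac + 2 else ac) 0
    (p : Int) - aff

-- inner sieve loop 'for j in range(i*i, n_max+1, i): sieve[j] = False'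
-- (range(a, b, i) with 0 < i and a,b : Nat is List.range' a ((b-a+i-1)/i) i)
def pvCross (i N : Nat) (s : List Bool) : List Bool :=
  (List.range' (i * i) ((N + 1 - i * i + i - 1) / i) i).foldl (fun s j => s.set j false) s

-- the Eratosthenes sieve; int(n_max**0.5) = Nat.sqrt (exact: double pow is correctly
-- rounded and n_max ≤ 2^31 on Dom); all indices are in range, so sieve[i] is getD
def pvSieve (N : Nat) : List Bool :=
  ((List.range' 2 (Nat.sqrt N + 1 - 2)).foldl
    (fun s i => if s.getD i false then pvCross i N s else s)
    (((List.replicate (N + 1) true).set 0 false).set 1 false))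

def pvPrimes (N : Nat) : List Nat :=
  let s := pvSieve N
  (List.range' 2 (N + 1 - 2)).filter (fun i => s.getD i false)

def pvApDict (N : Nat) : PySem.Dict Nat Int :=
  (pvPrimes N).foldl (fun d p => d.insert p (pvApFun p)) PySem.Dict.empty

-- 'while pk * p <= n_max: …'; pk strictly grows each turn, so fuel N+1 is enough
def pvApkWhile (N p : Nat) (apv : Int) :
    Nat → Nat → Nat → PySem.Dict (Nat × Nat) Int → PySem.Dict (Nat × Nat) Int
  | 0, _, _, d => d
  | fuel + 1, pk, k, d =>
    if pk * p ≤ N then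
      let v : Int := if p = 37 then apv ^ (k + 1)
        else apv * d.getD (p, k) 0 - (p : Int) * d.getD (p, k - 1) 0
      pvApkWhile N p apv fuel (pk * p) (k + 1) (d.insert (p, k + 1) v)
    else d

def pvApkDict (N : Nat) : PySem.Dict (Nat × Nat) Int :=
  let ap := pvApDict N
  (pvPrimes N).foldl (fun d p =>
    pvApkWhile N p (ap.getD p 0) (N + 1) p 1
      ((d.insert (p, 0) 1).insert (p, 1) (ap.getD p 0)))
    PySem.Dict.empty

-- A's 'k = 0; while temp % p == 0: k += 1; temp //= p'; temp shrinks, fuel = temp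
def pvDivOut (p : Nat) : Nat → Nat → Nat → Nat × Nat
  | 0, k, t => (k, t)
  | fuel + 1, k, t => if t % p = 0 then pvDivOut p fuel (k + 1) (t / p) else (k, t)

-- A's per-n trial-division loop over the prime list, with its break 'if p*p > temp'
def pvTrial (apk : PySem.Dict (Nat × Nat) Int) :
    List Nat → Nat → Int → Nat × Int
  | [], t, r => (t, r)
  | p :: ps, t, r =>
    if t < p * p then (t, r)
    else if t % p = 0 then
      let kt := pvDivOut p t 0 t
      pvTrial apk ps kt.2 (r * apk.getD (p, kt.1) 0)
    else pvTrial apk ps t r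

def compute_an_table (n_max : Int) : List Int :=
  let N := n_max.toNat
  let primes := pvPrimes N
  let ap := pvApDict N
  let apk := pvApkDict N
  let an0 := (List.replicate (N + 1) (0 : Int)).set 1 1
  (List.range' 2 (N + 1 - 2)).foldl (fun an n =>
    let tr := pvTrial apk primes n 1
    let r := if 1 < tr.1 then tr.2 * ap.getD tr.1 0 else tr.2
    an.set n r) an0

-- ===== PORT B =====

-- B's 'while d*d <= n and n % d != 0: d += 1'; d gains 1 per turn, fuel n is enough
def pvBsfLoop (n : Nat) : Nat → Nat → Nat
  | 0, d => d
  | fuel + 1, d => if d * d ≤ n ∧ ¬ n % d = 0 then pvBsfLoop n fuel (d + 1) else d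

-- 'spf[n] = d if d*d <= n else n'
def pvBsf (n : Nat) : Nat :=
  let d := pvBsfLoop n n 2
  if d * d ≤ n then d else n

-- B's 'q, m = p, n // p; while m % p == 0: q *= p; m //= p'; m shrinks, fuel = m
def pvBextract (p : Nat) : Nat → Nat → Nat → Nat × Nat
  | 0, q, m => (q, m)
  | fuel + 1, q, m => if m % p = 0 then pvBextract p fuel (q * p) (m / p) else (q, m)

-- ap_37a1: the signed character sum; generator-sum count at p = 2 is a filter length
def pvApB (p : Nat) : Int :=
  if p = 37 then -1
  else if p = 2 then
    let pts : Int := 1 + ((List.range 2).flatMap (fun x => (List.range 2).filter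
      (fun y => PySem.Int.mod ((y : Int) * y + y - (x : Int) * x * x + x) 2 = 0))).length
    3 - pts
  else
    let s : Int := (List.range p).foldl (fun (s : Int) (x : Nat) =>
      let d := PySem.Int.mod (4 * (x : Int) * x * x - 4 * x + 1) (p : Int)
      if ¬ d = 0 then
        s + (if PySem.Int.powMod d ((p - 1) / 2) (p : Int) = 1 then 1 else -1)
      else s) 0;
    -s

def compute_an_table_alt (n_max : Int) : List Int :=
  let N := n_max.toNat
  let spf := (List.range' 2 (N + 1 - 2)).foldl (fun s n => s.set n (pvBsf n))
    (List.replicate (N + 1) 0)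
  let an0 := (List.replicate (N + 1) (0 : Int)).set 1 1
  (List.range' 2 (N + 1 - 2)).foldl (fun an n =>
    let p := spf.getD n 0
    let qm := pvBextract p n p (n / p)
    an.set n (
      if 1 < qm.2 then an.getD qm.1 0 * an.getD qm.2 0
      else if qm.1 = p then pvApB p
      else if p = 37 then - an.getD (n / 37) 0
      else an.getD p 0 * an.getD (n / p) 0 - (p : Int) * an.getD (n / p / p) 0)) an0

-- ===== PRECONDITION & SPEC =====
-- Pre_ excludes n_max ≤ 0, on which the Python A raises IndexError at sieve[1] = False.
def Pre_compute_an_table (n_max : Int) : Prop := 1 ≤ n_max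
instance (n_max : Int) : Decidable (Pre_compute_an_table n_max) := by
  unfold Pre_compute_an_table; infer_instance
def pvWitness_compute_an_table : Int := (12)

def Spec_compute_an_table (n_max : Int) (out : List Int) : Prop := out = compute_an_table_alt n_max
instance (n_max : Int) (out : List Int) : Decidable (Spec_compute_an_table n_max out) := by
  unfold Spec_compute_an_table; infer_instance

-- ===== CLAIM (what is proved, stated in full; the proofs are below) =====
def Claim_equal_compute_an_table : Prop := ∀ (n_max : Int), Dom_compute_an_table n_max → Pre_compute_an_table n_max → Spec_compute_an_table n_max (compute_an_table n_max)

-- ===== LEMMAS AND PROOFS =====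

-- the a_{p^k} recurrence as a pure function
def pvApkF (p : Nat) : Nat → Int
  | 0 => 1
  | 1 => pvApFun p
  | k + 2 => if p = 37 then (pvApFun p) ^ (k + 2)
      else pvApFun p * pvApkF p (k + 1) - (p : Int) * pvApkF p k

-- the common value both assemblies compute: n ↦ ∏_{p^k ∥ n} apk(p,k)
noncomputable def pvF (n : Nat) : Int := n.factorization.prod fun p k => pvApkF p k

lemma pvFoldlSet_getElem? {α : Type} (l : List Nat) (g : Nat → α) (s : List α) (j : Nat) :
    (l.foldl (fun s n => s.set n (g n)) s)[j]? =
      if j ∈ l ∧ j < s.length then some (g j) else s[j]? := by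
  induction l generalizing s with
  | nil => simp
  | cons a l ih =>
    simp only [List.foldl_cons]
    rw [ih, List.length_set]
    by_cases hlen : j < s.length
    · by_cases hjl : j ∈ l
      · simp [hjl, hlen, List.mem_cons]
      · by_cases hja : j = a
        · subst hja
          rw [if_neg (by tauto), List.getElem?_set_self hlen, if_pos ⟨by simp, hlen⟩]
        · rw [if_neg (by tauto), List.getElem?_set_ne (by omega : a ≠ j),
            if_neg (by simp [List.mem_cons, hja, hjl])]
    · rw [if_neg (by tauto), if_neg (by tauto)]
      by_cases hja : j = a
      · subst hja
        rw [List.set_eq_of_length_le (by omega)]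
      · rw [List.getElem?_set_ne (by omega : a ≠ j)]

lemma pvFoldlSet_length {α : Type} (l : List Nat) (g : Nat → α) (s : List α) :
    (l.foldl (fun s n => s.set n (g n)) s).length = s.length := by
  induction l generalizing s with
  | nil => rfl
  | cons a l ih => simp only [List.foldl_cons]; rw [ih, List.length_set]

lemma pvMemRangeStep (N a i j : Nat) (hi : 0 < i) (ha : a ≤ N) :
    (j ∈ List.range' a ((N + 1 - a + i - 1) / i) i) ↔ a ≤ j ∧ j ≤ N ∧ i ∣ j - a := by
  rw [List.mem_range']
  constructor
  · rintro ⟨m, hm, rfl⟩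
    refine ⟨by omega, ?_, ⟨m, by omega⟩⟩
    have h1 : m + 1 ≤ (N + 1 - a + i - 1) / i := hm
    rw [Nat.le_div_iff_mul_le hi] at h1
    have h2 : (m + 1) * i = m * i + i := by ring
    have h3 : i * m = m * i := by ring
    omega
  · rintro ⟨h1, h2, m, hm⟩
    refine ⟨m, ?_, by omega⟩
    rw [Nat.lt_iff_add_one_le, Nat.le_div_iff_mul_le hi]
    have h3 : (m + 1) * i = m * i + i := by ring
    have h4 : i * m = m * i := by ring
    omega


def pvCrossed (t j : Nat) : Prop := ∃ q, Nat.Prime q ∧ q ≤ t ∧ q ∣ j ∧ q * q ≤ j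

-- not prime-crossed below oneself ↔ prime
lemma pvNotCrossed_iff_prime (i : Nat) (h2 : 2 ≤ i) : (¬ pvCrossed (i - 1) i) ↔ Nat.Prime i := by
  constructor
  · intro h
    by_contra hnp
    apply h
    refine ⟨i.minFac, Nat.minFac_prime (by omega), ?_, Nat.minFac_dvd i, ?_⟩
    · have hsq := Nat.minFac_sq_le_self (by omega) hnp
      have h2m : 2 ≤ i.minFac := (Nat.minFac_prime (by omega : i ≠ 1)).two_le
      have : i.minFac + 1 ≤ i := by nlinarith [hsq]
      omega
    · have := Nat.minFac_sq_le_self (by omega) hnp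
      nlinarith [this]
  · intro hp ⟨q, hq, hle, hdvd, hsq⟩
    have := (Nat.prime_dvd_prime_iff_eq hq hp).mp hdvd
    omega

lemma pvCross_getD (i N : Nat) (h2 : 2 ≤ i) (hiN : i * i ≤ N) (s : List Bool)
    (hs : s.length = N + 1) (j : Nat) (hj : j ≤ N) :
    (pvCross i N s).getD j false =
      if i ∣ j ∧ i * i ≤ j then false else s.getD j false := by
  unfold pvCross
  have hlen : j < s.length := by omega
  have hmem := pvMemRangeStep N (i * i) i j (by omega) hiN
  have hget := pvFoldlSet_getElem? (List.range' (i * i) ((N + 1 - i * i + i - 1) / i) i)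
      (fun _ => false) s j
  rw [List.getD_eq_getElem?_getD, List.getD_eq_getElem?_getD, hget]
  by_cases hc : i ∣ j ∧ i * i ≤ j
  · rw [if_pos ⟨hmem.mpr ⟨hc.2, hj, (Nat.dvd_sub hc.1 (dvd_mul_left i i) : i ∣ j - i * i)⟩, hlen⟩]
    rw [if_pos hc]
    rfl
  · rw [if_neg ?_, if_neg hc]
    intro ⟨hm, _⟩
    rcases hmem.mp hm with ⟨hij, hjN, m, hmEq⟩
    refine hc ⟨⟨i + m, ?_⟩, hij⟩
    have hh : i * (i + m) = i * i + i * m := by ring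
    omega

lemma pvS0_getD (N j : Nat) (hj : j ≤ N) :
    ((((List.replicate (N + 1) true).set 0 false).set 1 false).getD j false = true ↔ 2 ≤ j) := by
  rw [List.getD_eq_getElem?_getD]
  match j with
  | 0 =>
    rw [List.getElem?_set_ne (by omega), List.getElem?_set_self (by simp)]
    simp
  | 1 =>
    rw [List.getElem?_set_self (by simp [List.length_set]; omega)]
    simp
  | (j+2) =>
    rw [List.getElem?_set_ne (by omega), List.getElem?_set_ne (by omega),
      List.getElem?_replicate_of_lt (by omega)]
    simp

lemma pvSieve_invariant (N c : Nat) (hc : c + 1 ≤ Nat.sqrt N) :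
    ((List.range' 2 c).foldl
        (fun s i => if s.getD i false then pvCross i N s else s)
        (((List.replicate (N + 1) true).set 0 false).set 1 false)).length = N + 1 ∧
    ∀ j, j ≤ N →
      (((List.range' 2 c).foldl
        (fun s i => if s.getD i false then pvCross i N s else s)
        (((List.replicate (N + 1) true).set 0 false).set 1 false)).getD j false = true ↔
        (2 ≤ j ∧ ¬ pvCrossed (c + 1) j)) := by
  induction c with
  | zero =>
    constructor
    · simp
    · intro j hj
      simp only [List.range'_zero, List.foldl_nil]
      rw [pvS0_getD N j hj]
      have : ¬ pvCrossed 1 j := by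
        rintro ⟨q, hq, hq1, -, -⟩
        have := hq.two_le
        omega
      tauto
  | succ c ih =>
    have hc' : c + 1 ≤ Nat.sqrt N := by omega
    obtain ⟨ihlen, ihget⟩ := ih hc'
    set s := (List.range' 2 c).foldl
        (fun s i => if s.getD i false then pvCross i N s else s)
        (((List.replicate (N + 1) true).set 0 false).set 1 false) with hs
    rw [List.range'_concat, List.foldl_append]
    simp only [List.foldl_cons, List.foldl_nil, one_mul]
    rw [← hs]
    have hiN : 2 + c ≤ N := by
      have h1 : (2 + c) * (2 + c) ≤ N := by
        have := Nat.le_sqrt.mp (show 2 + c ≤ Nat.sqrt N by omega)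
        exact this
      nlinarith
    have hsqN : (2 + c) * (2 + c) ≤ N := Nat.le_sqrt.mp (by omega)
    have hcond := ihget (2 + c) hiN
    have hprime_iff : (s.getD (2 + c) false = true) ↔ Nat.Prime (2 + c) := by
      rw [hcond]
      have := pvNotCrossed_iff_prime (2 + c) (by omega)
      have he : 2 + c - 1 = c + 1 := by omega
      rw [he] at this
      constructor
      · rintro ⟨-, h⟩; exact this.mp h
      · intro hp; exact ⟨by omega, this.mpr hp⟩
    by_cases hb : s.getD (2 + c) false = true
    · rw [if_pos hb]
      have hp : Nat.Prime (2 + c) := hprime_iff.mp hb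
      constructor
      · unfold pvCross
        rw [pvFoldlSet_length, ihlen]
      · intro j hj
        rw [pvCross_getD (2 + c) N (by omega) hsqN s ihlen j hj]
        by_cases hd : (2 + c) ∣ j ∧ (2 + c) * (2 + c) ≤ j
        · rw [if_pos hd]
          simp only [false_iff, not_and, Bool.false_eq_true, false_iff]
          intro h2j hnc
          exact hnc ⟨2 + c, hp, by omega, hd.1, hd.2⟩
        · rw [if_neg hd, ihget j hj]
          constructor
          · rintro ⟨h2j, hnc⟩
            refine ⟨h2j, ?_⟩
            rintro ⟨q, hq, hqle, hqd, hqs⟩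
            rcases Nat.lt_or_ge q (c + 2) with h | h
            · exact hnc ⟨q, hq, by omega, hqd, hqs⟩
            · have : q = 2 + c := by omega
              subst this
              exact hd ⟨hqd, hqs⟩
          · rintro ⟨h2j, hnc⟩
            refine ⟨h2j, ?_⟩
            rintro ⟨q, hq, hqle, hqd, hqs⟩
            exact hnc ⟨q, hq, by omega, hqd, hqs⟩
    · rw [if_neg hb]
      refine ⟨ihlen, ?_⟩
      intro j hj
      rw [ihget j hj]
      have hnp : ¬ Nat.Prime (2 + c) := fun hp => hb (hprime_iff.mpr hp)
      constructor
      · rintro ⟨h2j, hnc⟩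
        refine ⟨h2j, ?_⟩
        rintro ⟨q, hq, hqle, hqd, hqs⟩
        rcases Nat.lt_or_ge q (c + 2) with h | h
        · exact hnc ⟨q, hq, by omega, hqd, hqs⟩
        · have : q = 2 + c := by omega
          subst this
          exact hnp hq
      · rintro ⟨h2j, hnc⟩
        exact ⟨h2j, fun ⟨q, hq, hqle, hqd, hqs⟩ => hnc ⟨q, hq, by omega, hqd, hqs⟩⟩


lemma pvSieve_getD (N : Nat) (hN : 1 ≤ N) (j : Nat) (h2 : 2 ≤ j) (hj : j ≤ N) :
    ((pvSieve N).getD j false = true ↔ Nat.Prime j) := by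
  have hs1 : 1 ≤ Nat.sqrt N := Nat.le_sqrt.mpr (by omega)
  have hcount : Nat.sqrt N + 1 - 2 = (Nat.sqrt N - 1) := by omega
  have hinv := (pvSieve_invariant N (Nat.sqrt N - 1) (by omega)).2 j hj
  unfold pvSieve
  rw [hcount, hinv]
  have hc1 : Nat.sqrt N - 1 + 1 = Nat.sqrt N := by omega
  rw [hc1]
  constructor
  · rintro ⟨-, hnc⟩
    by_contra hnp
    apply hnc
    have hmf : 2 ≤ j.minFac := (Nat.minFac_prime (by omega : j ≠ 1)).two_le
    have hsq := Nat.minFac_sq_le_self (by omega) hnp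
    refine ⟨j.minFac, Nat.minFac_prime (by omega), ?_, Nat.minFac_dvd j, by nlinarith⟩
    exact Nat.le_sqrt.mpr (by nlinarith)
  · intro hp
    refine ⟨h2, ?_⟩
    rintro ⟨q, hq, hqle, hqd, hqs⟩
    have := (Nat.prime_dvd_prime_iff_eq hq hp).mp hqd
    subst this
    nlinarith [hq.two_le]

lemma pvMemPrimes (N : Nat) (p : Nat) (hN : 1 ≤ N) :
    p ∈ pvPrimes N ↔ Nat.Prime p ∧ p ≤ N := by
  unfold pvPrimes
  rw [List.mem_filter]
  constructor
  · rintro ⟨hmem, hget⟩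
    rw [List.mem_range'_1] at hmem
    have h2 : 2 ≤ p := hmem.1
    have hle : p ≤ N := by omega
    exact ⟨(pvSieve_getD N hN p h2 hle).mp (by simpa using hget), hle⟩
  · rintro ⟨hp, hle⟩
    have h2 := hp.two_le
    refine ⟨List.mem_range'_1.mpr ⟨h2, by omega⟩, ?_⟩
    simpa using (pvSieve_getD N hN p h2 hle).mpr hp

lemma pvPrimes_sorted (N : Nat) : (pvPrimes N).Pairwise (· < ·) :=
  List.Pairwise.filter _ (List.pairwise_lt_range' 1)


-- generic insert-fold lemmas
lemma pvFoldlInsert_get?_notmem {ν : Type} (l : List Nat) (f : Nat → ν)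
    (d : PySem.Dict Nat ν) (p : Nat) (hp : p ∉ l) :
    (l.foldl (fun d q => d.insert q (f q)) d).get? p = d.get? p := by
  induction l generalizing d with
  | nil => rfl
  | cons a l ih =>
    simp only [List.foldl_cons]
    have h1 : p ∉ l := by simp at hp; tauto
    have h2 : p ≠ a := by simp at hp; tauto
    rw [ih _ h1, PySem.Dict.get?_insert_of_ne _ _ h2]

lemma pvFoldlInsert_getD {ν : Type} [Inhabited ν] (l : List Nat) (f : Nat → ν)
    (d : PySem.Dict Nat ν) (p : Nat) (hp : p ∈ l) (d0 : ν) :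
    (l.foldl (fun d q => d.insert q (f q)) d).getD p d0 = f p := by
  induction l generalizing d with
  | nil => simp at hp
  | cons a l ih =>
    simp only [List.foldl_cons]
    by_cases hpl : p ∈ l
    · exact ih _ hpl
    · have hpa : p = a := by simp at hp; tauto
      subst hpa
      rw [PySem.Dict.getD_eq_get?_getD, pvFoldlInsert_get?_notmem l f _ p hpl,
        PySem.Dict.get?_insert_self]
      rfl


lemma pvApkWhile_get?_ne (N p : Nat) (apv : Int) :
    ∀ (fuel pk k : Nat) (d : PySem.Dict (Nat × Nat) Int) (q : Nat × Nat), q.1 ≠ p →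
    (pvApkWhile N p apv fuel pk k d).get? q = d.get? q := by
  intro fuel
  induction fuel with
  | zero => intro pk k d q hq; rfl
  | succ fuel ih =>
    intro pk k d q hq
    unfold pvApkWhile
    by_cases h : pk * p ≤ N
    · rw [if_pos h, ih _ _ _ _ hq, PySem.Dict.get?_insert_of_ne _ _ (by
        intro he; apply hq; rw [he])]
    · rw [if_neg h]

lemma pvApkWhile_get? (N p : Nat) (hp : 2 ≤ p) :
    ∀ (fuel : Nat), ∀ (pk k : Nat) (d : PySem.Dict (Nat × Nat) Int),
    1 ≤ k → pk = p ^ k → pk ≤ N → N + 1 ≤ fuel + pk →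
    (∀ j, d.get? (p, j) = if j ≤ k then some (pvApkF p j) else none) →
    ∀ j, (pvApkWhile N p (pvApFun p) fuel pk k d).get? (p, j) =
      if p ^ j ≤ N ∨ j ≤ k then some (pvApkF p j) else none := by
  intro fuel
  induction fuel with
  | zero => intro pk k d hk hpk hpkN hfuel hd j; omega
  | succ fuel ih =>
    intro pk k d hk hpk hpkN hfuel hd j
    unfold pvApkWhile
    by_cases h : pk * p ≤ N
    · rw [if_pos h]
      have hmul : pk + 1 ≤ pk * p := by
        have h1 : 1 ≤ pk := by
          have := Nat.one_le_two_pow (n := k)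
          calc 1 ≤ p ^ k := Nat.one_le_pow _ _ (by omega)
          _ = pk := hpk.symm
        nlinarith
      have hval : (if p = 37 then (pvApFun p) ^ (k + 1)
          else pvApFun p * d.getD (p, k) 0 - (p : Int) * d.getD (p, k - 1) 0)
          = pvApkF p (k + 1) := by
        have hk1 : d.getD (p, k) 0 = pvApkF p k := by
          rw [PySem.Dict.getD_eq_get?_getD, hd k, if_pos le_rfl]; rfl
        have hk2 : d.getD (p, k - 1) 0 = pvApkF p (k - 1) := by
          rw [PySem.Dict.getD_eq_get?_getD, hd (k - 1), if_pos (by omega)]; rfl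
        have hke : k + 1 = (k - 1) + 2 := by omega
        rw [hk1, hk2, hke]
        show _ = pvApkF p ((k-1) + 2)
        simp only [pvApkF]
        have hke2 : (k - 1) + 1 = k := by omega
        rw [hke2]
      rw [hval]
      have hres := ih (pk * p) (k + 1) (d.insert (p, k + 1) (pvApkF p (k + 1)))
        (by omega) (by rw [hpk]; ring) h (by omega) ?_ j
      · rw [hres]
        congr 1
        by_cases hj : j = k + 1
        · subst hj
          have hpe : p ^ (k + 1) = pk * p := by rw [hpk]; ring
          have : p ^ (k + 1) ≤ N := by omega
          simp [this]
        · simp only [eq_iff_iff]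
          omega
      · intro j'
        rw [PySem.Dict.get?_insert]
        by_cases hj' : j' = k + 1
        · subst hj'
          simp
        · rw [if_neg (by simp [hj']), hd j', if_congr (by omega : (j' ≤ k) ↔ (j' ≤ k + 1)) rfl rfl]
    · rw [if_neg h, hd j]
      have hiff : (p ^ j ≤ N ∨ j ≤ k) ↔ j ≤ k := by
        constructor
        · rintro (hpj | hjk)
          · by_contra hgt
            have hj1 : k + 1 ≤ j := by omega
            have : p ^ (k + 1) ≤ p ^ j := Nat.pow_le_pow_right (by omega) hj1
            have hpk1 : p ^ (k + 1) = pk * p := by rw [hpk]; ring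
            omega
          · exact hjk
        · intro hjk; exact Or.inr hjk
      exact (if_congr hiff.symm rfl rfl)

lemma pvApkFold_get?_notmem (N : Nat) (apd : Nat → Int) (l : List Nat)
    (d : PySem.Dict (Nat × Nat) Int) (a j : Nat) (ha : a ∉ l) :
    (l.foldl (fun d q => pvApkWhile N q (apd q) (N + 1) q 1
        ((d.insert (q, 0) 1).insert (q, 1) (apd q))) d).get? (a, j) = d.get? (a, j) := by
  induction l generalizing d with
  | nil => rfl
  | cons b l ih =>
    have hb : a ≠ b := by simp at ha; tauto
    simp only [List.foldl_cons]
    rw [ih _ (by simp at ha; tauto), pvApkWhile_get?_ne _ _ _ _ _ _ _ _ (by simpa using hb),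
      PySem.Dict.get?_insert_of_ne _ _ (by simp [hb]),
      PySem.Dict.get?_insert_of_ne _ _ (by simp [hb])]

lemma pvApkFold_get? (N : Nat) (apd : Nat → Int) :
    ∀ (l : List Nat) (d : PySem.Dict (Nat × Nat) Int), l.Nodup →
    (∀ q ∈ l, 2 ≤ q ∧ q ≤ N ∧ apd q = pvApFun q) →
    (∀ q ∈ l, ∀ j, d.get? (q, j) = none) →
    ∀ p ∈ l, ∀ k, p ^ k ≤ N →
    (l.foldl (fun d q => pvApkWhile N q (apd q) (N + 1) q 1
        ((d.insert (q, 0) 1).insert (q, 1) (apd q))) d).get? (p, k) = some (pvApkF p k) := by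
  intro l
  induction l with
  | nil => intro d _ _ _ p hp; simp at hp
  | cons a l ih =>
    intro d hnd hq hnone p hp k hk
    simp only [List.foldl_cons]
    rcases List.mem_cons.mp hp with rfl | hpl
    · have hal : p ∉ l := (List.nodup_cons.mp hnd).1
      obtain ⟨h2, hN, hap⟩ := hq p (by simp)
      rw [pvApkFold_get?_notmem N apd l _ p k hal, hap]
      have hd2 : ∀ j, (((d.insert (p, 0) 1).insert (p, 1) (pvApFun p)).get? (p, j))
          = if j ≤ 1 then some (pvApkF p j) else none := by
        intro j
        match j with
        | 0 =>
          rw [PySem.Dict.get?_insert_of_ne _ _ (by simp), PySem.Dict.get?_insert_self]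
          rfl
        | 1 => rw [PySem.Dict.get?_insert_self]; rfl
        | (j+2) =>
          rw [PySem.Dict.get?_insert_of_ne _ _ (by simp),
            PySem.Dict.get?_insert_of_ne _ _ (by simp), hnone p (by simp) (j+2)]
          rfl
      have hwl := pvApkWhile_get? N p h2 (N + 1) p 1
        ((d.insert (p, 0) 1).insert (p, 1) (pvApFun p))
        le_rfl (pow_one p).symm hN (by omega) hd2 k
      rw [hwl, if_pos (Or.inl hk)]
    · apply ih _ (List.nodup_cons.mp hnd).2 (fun q hql => hq q (by simp [hql]))
        ?_ p hpl k hk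
      intro q hql j
      have hqa : q ≠ a := by
        rintro rfl
        exact (List.nodup_cons.mp hnd).1 hql
      rw [pvApkWhile_get?_ne _ _ _ _ _ _ _ _ (by simpa using hqa),
        PySem.Dict.get?_insert_of_ne _ _ (by simp [hqa]),
        PySem.Dict.get?_insert_of_ne _ _ (by simp [hqa]), hnone q (by simp [hql]) j]


lemma pvF_one : pvF 1 = 1 := by simp [pvF]

lemma pvF_prime (q : Nat) (hq : Nat.Prime q) : pvF q = pvApFun q := by
  unfold pvF
  rw [hq.factorization, Finsupp.prod_single_index (by rfl)]
  rfl

lemma pvF_pow_mul (p k m : Nat) (hp : Nat.Prime p) (hm : ¬ p ∣ m) (hm0 : 0 < m)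
    (_hk : 0 < k) : pvF (p ^ k * m) = pvApkF p k * pvF m := by
  unfold pvF
  rw [Nat.factorization_mul (pow_ne_zero k hp.pos.ne') (by omega),
    Finsupp.prod_add_index_of_disjoint, hp.factorization_pow,
    Finsupp.prod_single_index (by rfl)]
  · rw [hp.factorization_pow]
    rw [Finset.disjoint_left]
    intro q hq1 hq2
    rw [Finsupp.mem_support_iff, Finsupp.single_apply] at hq1
    have hqp : q = p := by by_contra hne; rw [if_neg (by omega)] at hq1; omega
    subst hqp
    rw [Nat.support_factorization, Nat.mem_primeFactors] at hq2
    exact hm hq2.2.1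

lemma pvF_pow (p k : Nat) (hp : Nat.Prime p) : pvF (p ^ k) = pvApkF p k := by
  match k with
  | 0 => simp [pvF_one, pvApkF]
  | k + 1 =>
    have := pvF_pow_mul p (k + 1) 1 hp (by simpa using hp.one_lt.ne') (by omega) (by omega)
    rw [mul_one] at this
    rw [this, pvF_one, mul_one]

lemma pvDivOut_spec (p : Nat) (hp : 2 ≤ p) :
    ∀ (t : Nat), 0 < t → ∀ (fuel : Nat), t ≤ fuel → ∀ (k0 : Nat),
    ∃ k m, pvDivOut p fuel k0 t = (k0 + k, m) ∧ t = p ^ k * m ∧ ¬ p ∣ m ∧ 0 < m ∧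
      (p ∣ t → 1 ≤ k) := by
  intro t
  induction t using Nat.strong_induction_on with
  | _ t ih =>
    intro ht fuel hfuel k0
    match fuel, hfuel with
    | 0, hfuel => omega
    | fuel + 1, hfuel =>
      by_cases hdvd : p ∣ t
      · have hmod : t % p = 0 := Nat.dvd_iff_mod_eq_zero.mp hdvd
        have hpt : p ≤ t := Nat.le_of_dvd ht hdvd
        have htp : t / p < t := Nat.div_lt_self ht (by omega)
        have htp0 : 0 < t / p := Nat.div_pos hpt (by omega)
        obtain ⟨k, m, heq, hfac, hnd, hm0, -⟩ :=
          ih (t / p) htp htp0 fuel (by omega) (k0 + 1)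
        refine ⟨k + 1, m, ?_, ?_, hnd, hm0, fun _ => by omega⟩
        · unfold pvDivOut
          rw [if_pos hmod, heq]
          congr 1
          omega
        · have : t = p * (t / p) := (Nat.mul_div_cancel' hdvd).symm
          rw [this, hfac]
          ring
      · have hmod : t % p ≠ 0 := fun h => hdvd (Nat.dvd_iff_mod_eq_zero.mpr h)
        refine ⟨0, t, ?_, by simp, hdvd, ht, fun h => absurd h hdvd⟩
        unfold pvDivOut
        rw [if_neg hmod]
        rfl


lemma pvApDict_getD (N p : Nat) (hp : p ∈ pvPrimes N) :
    (pvApDict N).getD p 0 = pvApFun p := by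
  unfold pvApDict
  exact pvFoldlInsert_getD (pvPrimes N) pvApFun PySem.Dict.empty p hp 0

lemma pvApkDict_getD (N p k : Nat) (hN : 1 ≤ N) (hp : Nat.Prime p) (hpN : p ≤ N)
    (hk : p ^ k ≤ N) : (pvApkDict N).getD (p, k) 0 = pvApkF p k := by
  have hnd : (pvPrimes N).Nodup := (pvPrimes_sorted N).imp Nat.ne_of_lt
  have hres := pvApkFold_get? N (fun q => (pvApDict N).getD q 0) (pvPrimes N)
    PySem.Dict.empty hnd
    (fun q hq => ⟨((pvMemPrimes N q hN).mp hq).1.two_le, ((pvMemPrimes N q hN).mp hq).2,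
      pvApDict_getD N q hq⟩)
    (fun q _ j => PySem.Dict.get?_empty _)
    p ((pvMemPrimes N p hN).mpr ⟨hp, hpN⟩) k hk
  have h2 : (pvApkDict N).get? (p, k) = some (pvApkF p k) := by
    unfold pvApkDict
    exact hres
  rw [PySem.Dict.getD_eq_get?_getD, h2]
  rfl

-- if no prime in the remaining list divides t and the loop would end, t is 1 or prime
lemma pvTrial_spec (N : Nat) (hN : 1 ≤ N) :
    ∀ (ps : List Nat), (∀ q ∈ ps, Nat.Prime q) → ps.Pairwise (· < ·) →
    ∀ (t : Nat) (r : Int), 0 < t → t ≤ N → (∀ q, Nat.Prime q → q ∣ t → q ∈ ps) →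
    (if 1 < (pvTrial (pvApkDict N) ps t r).1
      then (pvTrial (pvApkDict N) ps t r).2 * (pvApDict N).getD (pvTrial (pvApkDict N) ps t r).1 0
      else (pvTrial (pvApkDict N) ps t r).2) = r * pvF t := by
  intro ps
  induction ps with
  | nil =>
    intro _ _ t r ht htN hdiv
    have ht1 : t = 1 := by
      by_contra hne
      obtain ⟨q, hq, hqd⟩ := Nat.exists_prime_and_dvd hne
      exact absurd (hdiv q hq hqd) (List.not_mem_nil)
    subst ht1
    simp only [pvTrial]
    rw [if_neg (by omega), pvF_one, mul_one]
  | cons p ps ih =>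
    intro hprime hsort t r ht htN hdiv
    have hp : Nat.Prime p := hprime p (by simp)
    have hp2 : 2 ≤ p := hp.two_le
    simp only [pvTrial]
    by_cases hbreak : t < p * p
    · rw [if_pos hbreak]
      simp only
      by_cases ht1 : 1 < t
      · rw [if_pos ht1]
        have htp : Nat.Prime t := by
          by_contra hnp
          have hmf := Nat.minFac_prime (by omega : t ≠ 1)
          have hmem := hdiv t.minFac hmf (Nat.minFac_dvd t)
          have hge : p ≤ t.minFac := by
            rcases List.mem_cons.mp hmem with h | h
            · omega
            · have := (List.pairwise_cons.mp hsort).1 _ h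
              omega
          have hsq := Nat.minFac_sq_le_self (by omega) hnp
          nlinarith
        rw [pvF_prime t htp, pvApDict_getD N t ((pvMemPrimes N t hN).mpr ⟨htp, htN⟩)]
      · have ht1' : t = 1 := by omega
        rw [if_neg ht1]
        subst ht1'
        rw [pvF_one, mul_one]
    · rw [if_neg hbreak]
      by_cases hdvd : t % p = 0
      · rw [if_pos hdvd]
        have hpd : p ∣ t := Nat.dvd_iff_mod_eq_zero.mpr hdvd
        obtain ⟨k, m, heq, hfac, hnd, hm0, hk1⟩ := pvDivOut_spec p hp2 t ht t le_rfl 0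
        rw [Nat.zero_add] at heq
        simp only [heq]
        have hk : 1 ≤ k := hk1 hpd
        have hpkN : p ^ k ≤ N := by
          calc p ^ k ≤ p ^ k * m := Nat.le_mul_of_pos_right _ hm0
          _ = t := hfac.symm
          _ ≤ N := htN
        have hpN : p ≤ N := by
          calc p ≤ p ^ k := Nat.le_self_pow (by omega) p
          _ ≤ N := hpkN
        rw [pvApkDict_getD N p k hN hp hpN hpkN]
        have hmN : m ≤ N := by
          have hmt : m ≤ t := by
            have h1 : 0 < p ^ k := Nat.pow_pos (by omega)
            calc m = 1 * m := (one_mul m).symm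
            _ ≤ p ^ k * m := Nat.mul_le_mul_right m h1
            _ = t := hfac.symm
          omega
        have hrec := ih (fun q hq => hprime q (by simp [hq]))
          (List.pairwise_cons.mp hsort).2 m (r * pvApkF p k) hm0 hmN ?_
        · rw [hrec, hfac, pvF_pow_mul p k m hp hnd hm0 (by omega)]
          ring
        · intro q hq hqm
          have hqt : q ∣ t := by rw [hfac]; exact hqm.mul_left _
          rcases List.mem_cons.mp (hdiv q hq hqt) with rfl | h
          · exact absurd hqm hnd
          · exact h
      · rw [if_neg hdvd]
        apply ih (fun q hq => hprime q (by simp [hq])) (List.pairwise_cons.mp hsort).2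
          t r ht htN
        intro q hq hqt
        rcases List.mem_cons.mp (hdiv q hq hqt) with rfl | h
        · exact absurd (Nat.dvd_iff_mod_eq_zero.mp hqt) hdvd
        · exact h


lemma pvAn0_getElem? (N j : Nat) (hN : 1 ≤ N) :
    ((List.replicate (N + 1) (0 : Int)).set 1 1)[j]? =
      if j ≤ N then some (if j = 1 then 1 else 0) else none := by
  by_cases hj : j ≤ N
  · rw [if_pos hj]
    by_cases h1 : j = 1
    · subst h1
      rw [List.getElem?_set_self (by simp; omega)]
      simp
    · rw [List.getElem?_set_ne (by omega), List.getElem?_replicate_of_lt (by omega), if_neg h1]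
  · rw [if_neg hj, List.getElem?_eq_none (by simp [List.length_set]; omega)]

lemma pvA_eq (N : Nat) (hN : 1 ≤ N) :
    ∀ j, ((List.range' 2 (N + 1 - 2)).foldl (fun an n =>
      let tr := pvTrial (pvApkDict N) (pvPrimes N) n 1
      let r := if 1 < tr.1 then tr.2 * (pvApDict N).getD tr.1 0 else tr.2
      an.set n r) ((List.replicate (N + 1) (0 : Int)).set 1 1))[j]? =
      if j ≤ N then some (if j = 0 then 0 else pvF j) else none := by
  intro j
  have hfun : (fun (an : List Int) (n : Nat) =>
      let tr := pvTrial (pvApkDict N) (pvPrimes N) n 1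
      let r := if 1 < tr.1 then tr.2 * (pvApDict N).getD tr.1 0 else tr.2
      an.set n r) = fun an n => an.set n ((fun n =>
        if 1 < (pvTrial (pvApkDict N) (pvPrimes N) n 1).1
        then (pvTrial (pvApkDict N) (pvPrimes N) n 1).2 *
          (pvApDict N).getD (pvTrial (pvApkDict N) (pvPrimes N) n 1).1 0
        else (pvTrial (pvApkDict N) (pvPrimes N) n 1).2) n) := rfl
  rw [hfun, pvFoldlSet_getElem?]
  have hlen : ((List.replicate (N + 1) (0 : Int)).set 1 1).length = N + 1 := by simp
  rw [hlen]
  by_cases hmem : j ∈ List.range' 2 (N + 1 - 2)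
  · have hj : 2 ≤ j ∧ j ≤ N := by
      have := List.mem_range'_1.mp hmem
      omega
    have hval := pvTrial_spec N hN (pvPrimes N)
      (fun q hq => ((pvMemPrimes N q hN).mp hq).1) (pvPrimes_sorted N)
      j 1 (by omega) hj.2
      (fun q hqp hqd => (pvMemPrimes N q hN).mpr
        ⟨hqp, (Nat.le_of_dvd (by omega) hqd).trans hj.2⟩)
    rw [if_pos ⟨hmem, by omega⟩, if_pos (show j ≤ N by omega),
      if_neg (by omega : ¬ j = 0)]
    exact congrArg some (by rw [hval, one_mul])
  · rw [if_neg (by tauto), pvAn0_getElem? N j hN]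
    have hj : ¬ (2 ≤ j ∧ j ≤ N) := by
      intro h
      exact hmem (List.mem_range'_1.mpr ⟨h.1, by omega⟩)
    by_cases hjN : j ≤ N
    · rw [if_pos hjN, if_pos hjN]
      congr 1
      by_cases h1 : j = 1
      · subst h1; rw [if_pos rfl, if_neg (by omega), pvF_one]
      · have hj0 : j = 0 := by omega
        subst hj0
        rw [if_neg (by omega), if_pos rfl]
    · rw [if_neg hjN, if_neg hjN]

-- ===== B-side lemmas =====

-- the trial loop returns the least stopping point ≥ its start
lemma pvBsfLoop_composite (n : Nat) (h1 : 1 < n) (hnp : ¬ n.Prime) :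
    ∀ (fuel d : Nat), 2 ≤ d → d ≤ n.minFac → n.minFac ≤ fuel + d →
    pvBsfLoop n fuel d = n.minFac := by
  have hmf : Nat.Prime n.minFac := Nat.minFac_prime (by omega)
  have hsq : n.minFac * n.minFac ≤ n := by
    simpa [pow_two] using Nat.minFac_sq_le_self (by omega) hnp
  intro fuel
  induction fuel with
  | zero =>
    intro d h2 hdm hc
    have hde : d = n.minFac := by omega
    subst hde
    rfl
  | succ fuel ih =>
    intro d h2 hdm hc
    unfold pvBsfLoop
    by_cases he : d = n.minFac
    · subst he
      have hcond : ¬ (n.minFac * n.minFac ≤ n ∧ ¬ n % n.minFac = 0) := by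
        rintro ⟨-, hnd⟩
        exact hnd (Nat.dvd_iff_mod_eq_zero.mp (Nat.minFac_dvd n))
      rw [if_neg hcond]
    · have hlt : d < n.minFac := by omega
      have hnd : ¬ n % d = 0 := by
        intro hmod
        have := Nat.minFac_le_of_dvd h2 (Nat.dvd_iff_mod_eq_zero.mpr hmod)
        omega
      rw [if_pos ⟨by nlinarith, hnd⟩]
      exact ih (d + 1) (by omega) (by omega) (by omega)

lemma pvBsfLoop_prime (n : Nat) (hp : n.Prime) :
    ∀ (fuel d : Nat), 2 ≤ d → n + 1 ≤ fuel + d →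
    n < pvBsfLoop n fuel d * pvBsfLoop n fuel d := by
  intro fuel
  induction fuel with
  | zero =>
    intro d h2 hc
    have hz : pvBsfLoop n 0 d = d := rfl
    rw [hz]
    nlinarith
  | succ fuel ih =>
    intro d h2 hc
    unfold pvBsfLoop
    by_cases hcond : d * d ≤ n ∧ ¬ n % d = 0
    · rw [if_pos hcond]
      exact ih (d + 1) (by omega) (by omega)
    · rw [if_neg hcond]
      rcases Decidable.not_and_iff_not_or_not.mp hcond with h | h
      · omega
      · have hdvd : d ∣ n := Nat.dvd_iff_mod_eq_zero.mpr (by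
          by_contra hne; exact h hne)
        have := (Nat.Prime.eq_one_or_self_of_dvd hp d hdvd)
        have h2n := hp.two_le
        rcases this with h | h <;> nlinarith

lemma pvBsf_eq_minFac (n : Nat) (h2 : 2 ≤ n) : pvBsf n = n.minFac := by
  unfold pvBsf
  by_cases hp : n.Prime
  · have hloop := pvBsfLoop_prime n hp n 2 le_rfl (by omega)
    rw [if_neg (by omega), (Nat.prime_def_minFac.mp hp).2]
  · have hmf : Nat.Prime n.minFac := Nat.minFac_prime (by omega)
    have hsq : n.minFac * n.minFac ≤ n := by
      simpa [pow_two] using Nat.minFac_sq_le_self (by omega) hp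
    have hloop := pvBsfLoop_composite n (by omega) hp n 2 le_rfl hmf.two_le
      (by have := hmf.two_le; have := Nat.minFac_le (show 0 < n by omega); omega)
    rw [hloop, if_pos hsq]

lemma pvBextract_spec (p : Nat) (hp : 2 ≤ p) :
    ∀ (m : Nat), 0 < m → ∀ (fuel : Nat), m ≤ fuel → ∀ (q : Nat),
    ∃ k m', pvBextract p fuel q m = (q * p ^ k, m') ∧ m = p ^ k * m' ∧ ¬ p ∣ m' ∧ 0 < m' := by
  intro m
  induction m using Nat.strong_induction_on with
  | _ m ih =>
    intro hm fuel hfuel q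
    match fuel, hfuel with
    | 0, hfuel => omega
    | fuel + 1, hfuel =>
      by_cases hdvd : p ∣ m
      · have hmod : m % p = 0 := Nat.dvd_iff_mod_eq_zero.mp hdvd
        have hpm : p ≤ m := Nat.le_of_dvd hm hdvd
        have hmp : m / p < m := Nat.div_lt_self hm (by omega)
        have hmp0 : 0 < m / p := Nat.div_pos hpm (by omega)
        obtain ⟨k, m', heq, hfac, hnd, hm0⟩ := ih (m / p) hmp hmp0 fuel (by omega) (q * p)
        refine ⟨k + 1, m', ?_, ?_, hnd, hm0⟩
        · unfold pvBextract
          rw [if_pos hmod, heq]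
          congr 1
          ring
        · have : m = p * (m / p) := (Nat.mul_div_cancel' hdvd).symm
          rw [this, hfac]
          ring
      · have hmod : m % p ≠ 0 := fun h => hdvd (Nat.dvd_iff_mod_eq_zero.mpr h)
        refine ⟨0, m, ?_, by simp, hdvd, hm⟩
        unfold pvBextract
        rw [if_neg hmod]
        simp

-- the two a_p accumulations differ by exactly 1 per element
lemma pvApFold_diff (p : Nat) :
    ∀ (xs : List Nat) (a s : Int),
    xs.foldl (fun (ac : Int) (x : Nat) =>
      let disc := PySem.Int.mod (4 * (x : Int) * x * x - 4 * x + 1) (p : Int)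
      if disc = 0 then ac + 1
      else if PySem.Int.powMod disc ((p - 1) / 2) (p : Int) = 1 then ac + 2 else ac) a
    - xs.foldl (fun (s : Int) (x : Nat) =>
      let d := PySem.Int.mod (4 * (x : Int) * x * x - 4 * x + 1) (p : Int)
      if ¬ d = 0 then
        s + (if PySem.Int.powMod d ((p - 1) / 2) (p : Int) = 1 then 1 else -1)
      else s) s
    = a - s + xs.length := by
  intro xs
  induction xs with
  | nil => intro a s; simp
  | cons x xs ih =>
    intro a s
    simp only [List.foldl_cons, List.length_cons]
    set d := PySem.Int.mod (4 * (x : Int) * x * x - 4 * x + 1) (p : Int) with hd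
    by_cases h0 : d = 0
    · rw [if_pos h0, if_neg (not_not_intro h0), ih]
      push_cast
      ring
    · rw [if_neg h0, if_pos h0]
      by_cases h1 : PySem.Int.powMod d ((p - 1) / 2) (p : Int) = 1
      · rw [if_pos h1, if_pos h1, ih]
        push_cast
        ring
      · rw [if_neg h1, if_neg h1, ih]
        push_cast
        ring

lemma pvApB_eq (p : Nat) : pvApB p = pvApFun p := by
  by_cases h37 : p = 37
  · subst h37; rfl
  · by_cases h2 : p = 2
    · subst h2; decide
    · unfold pvApB pvApFun
      rw [if_neg h37, if_neg h37, if_neg (by simpa using h2), if_neg (by simpa using h2)]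
      have hdiff := pvApFold_diff p (List.range p) 0 0
      simp only [List.length_range] at hdiff
      simp only []
      omega

-- a_{37^k} = (-1)^k
lemma pvApkF_37 : ∀ k, pvApkF 37 k = (-1) ^ k
  | 0 => by simp [pvApkF]
  | 1 => by simp [pvApkF, pvApFun]
  | (k + 2) => by
    simp only [pvApkF]
    norm_num [pvApFun]

-- B's DP invariant: after processing 2..c+1, the table holds pvF on 1..c+1
lemma pvBalt_inv (N : Nat) (hN : 1 ≤ N) :
    ∀ c, c ≤ N - 1 →
    ((List.range' 2 c).foldl (fun an n =>
      let p := ((List.range' 2 (N + 1 - 2)).foldl (fun s n => s.set n (pvBsf n))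
        (List.replicate (N + 1) 0)).getD n 0
      let qm := pvBextract p n p (n / p)
      an.set n (
        if 1 < qm.2 then an.getD qm.1 0 * an.getD qm.2 0
        else if qm.1 = p then pvApB p
        else if p = 37 then - an.getD (n / 37) 0
        else an.getD p 0 * an.getD (n / p) 0 - (p : Int) * an.getD (n / p / p) 0))
      ((List.replicate (N + 1) (0 : Int)).set 1 1)).length = N + 1 ∧
    ∀ j, j ≤ N →
    ((List.range' 2 c).foldl (fun an n =>
      let p := ((List.range' 2 (N + 1 - 2)).foldl (fun s n => s.set n (pvBsf n))
        (List.replicate (N + 1) 0)).getD n 0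
      let qm := pvBextract p n p (n / p)
      an.set n (
        if 1 < qm.2 then an.getD qm.1 0 * an.getD qm.2 0
        else if qm.1 = p then pvApB p
        else if p = 37 then - an.getD (n / 37) 0
        else an.getD p 0 * an.getD (n / p) 0 - (p : Int) * an.getD (n / p / p) 0))
      ((List.replicate (N + 1) (0 : Int)).set 1 1)).getD j 0 =
      if 1 ≤ j ∧ j ≤ c + 1 then pvF j else 0 := by
  have hspf : ∀ n, 2 ≤ n → n ≤ N →
      ((List.range' 2 (N + 1 - 2)).foldl (fun s n => s.set n (pvBsf n))
        (List.replicate (N + 1) 0)).getD n 0 = n.minFac := by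
    intro n h2 hn
    rw [List.getD_eq_getElem?_getD, pvFoldlSet_getElem? _ pvBsf _ n,
      if_pos ⟨List.mem_range'_1.mpr ⟨h2, by omega⟩, by simp; omega⟩]
    rw [Option.getD_some, pvBsf_eq_minFac n h2]
  intro c
  induction c with
  | zero =>
    intro _
    constructor
    · simp
    · intro j hj
      simp only [List.range'_zero, List.foldl_nil]
      rw [List.getD_eq_getElem?_getD, pvAn0_getElem? N j hN, if_pos hj]
      by_cases h1 : j = 1
      · subst h1
        rw [if_pos rfl, if_pos (by omega), pvF_one]
        rfl
      · rw [if_neg h1, if_neg (by omega)]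
        rfl
  | succ c ih =>
    intro hc
    obtain ⟨ihlen, ihget⟩ := ih (by omega)
    rw [List.range'_concat, List.foldl_append]
    simp only [List.foldl_cons, List.foldl_nil, one_mul]
    set L := (List.range' 2 c).foldl (fun an n =>
      let p := ((List.range' 2 (N + 1 - 2)).foldl (fun s n => s.set n (pvBsf n))
        (List.replicate (N + 1) 0)).getD n 0
      let qm := pvBextract p n p (n / p)
      an.set n (
        if 1 < qm.2 then an.getD qm.1 0 * an.getD qm.2 0
        else if qm.1 = p then pvApB p
        else if p = 37 then - an.getD (n / 37) 0
        else an.getD p 0 * an.getD (n / p) 0 - (p : Int) * an.getD (n / p / p) 0))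
      ((List.replicate (N + 1) (0 : Int)).set 1 1) with hL
    -- the processed element n = 2 + c
    have hn2 : 2 ≤ 2 + c := by omega
    have hnN : 2 + c ≤ N := by omega
    rw [hspf (2 + c) hn2 hnN]
    set n := 2 + c with hn
    have hmf : Nat.Prime n.minFac := Nat.minFac_prime (by omega)
    have hp2 : 2 ≤ n.minFac := hmf.two_le
    have hmfd : n.minFac ∣ n := Nat.minFac_dvd n
    have hnp : n.minFac * (n / n.minFac) = n := Nat.mul_div_cancel' hmfd
    have hm1 : 0 < n / n.minFac := Nat.div_pos (Nat.le_of_dvd (by omega) hmfd) (by omega)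
    obtain ⟨k0, m, heq, hfac, hnd, hm0⟩ :=
      pvBextract_spec n.minFac hp2 (n / n.minFac) hm1 n (Nat.div_le_self _ _) n.minFac
    rw [heq]
    set p := n.minFac with hpdef
    have hqpow : p * p ^ k0 = p ^ (k0 + 1) := by ring
    have hnfac : n = p ^ (k0 + 1) * m := by
      rw [← hnp, hfac]; ring
    have hk1 : 1 ≤ k0 + 1 := by omega
    have hFn : pvF n = pvApkF p (k0 + 1) * pvF m := by
      rw [hnfac]; exact pvF_pow_mul p (k0 + 1) m hmf hnd hm0 hk1
    have hq_le : p ^ (k0 + 1) ≤ n := by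
      rw [hnfac]; exact Nat.le_mul_of_pos_right _ hm0
    have hlen' : ∀ v : Int, (L.set n v).length = N + 1 := fun v => by
      rw [List.length_set, ihlen]
    -- evaluate the chosen branch
    have hval : (if 1 < m then L.getD (p * p ^ k0) 0 * L.getD m 0
        else if p * p ^ k0 = p then pvApB p
        else if p = 37 then - L.getD (n / 37) 0
        else L.getD p 0 * L.getD (n / p) 0 - (p : Int) * L.getD (n / p / p) 0) = pvF n := by
      by_cases hm : 1 < m
      · rw [if_pos hm]
        have hq_lt : p ^ (k0 + 1) < n := by
          rw [hnfac]
          have h1 : 0 < p ^ (k0 + 1) := Nat.pow_pos (by omega)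
          nlinarith
        have hm_lt : m < n := by
          have h1 : 2 ≤ p ^ (k0 + 1) := le_trans hp2 (Nat.le_self_pow (by omega) p)
          rw [hnfac]; nlinarith
        have hq_pos : 0 < p ^ (k0 + 1) := Nat.pow_pos (by omega)
        rw [hqpow, ihget (p ^ (k0 + 1)) (by omega), ihget m (by omega),
          if_pos ⟨by omega, by omega⟩, if_pos ⟨by omega, by omega⟩,
          pvF_pow p (k0 + 1) hmf, hFn]
      · rw [if_neg hm]
        have hm_eq : m = 1 := by omega
        subst hm_eq
        rw [mul_one] at hnfac
        by_cases hk0 : k0 = 0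
        · subst hk0
          rw [if_pos (by ring)]
          have hnprime : n.Prime := by
            rw [Nat.prime_def_minFac]
            exact ⟨by omega, by rw [← hpdef, hnfac, pow_one]⟩
          rw [pvApB_eq, pvF_prime n hnprime, hnfac, pow_one]
        · have hk0' : 1 ≤ k0 := by omega
          have hne : p * p ^ k0 ≠ p := by
            rw [hqpow]
            intro hcon
            have h1 := Nat.pow_lt_pow_right (show 1 < p by omega)
              (show 1 < k0 + 1 by omega)
            rw [pow_one] at h1
            omega
          rw [if_neg hne]
          have hppow_lt : ∀ j, j < k0 + 1 → p ^ j < n := by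
            intro j hj
            rw [hnfac]
            exact Nat.pow_lt_pow_right (by omega) hj
          have hppow_pos : ∀ j : Nat, 0 < p ^ j := fun j => Nat.pow_pos (by omega)
          have hdivp : n / p = p ^ k0 := by
            rw [hnfac, pow_succ, Nat.mul_div_cancel _ (by omega)]
          by_cases h37 : p = 37
          · rw [if_pos h37]
            have hdiv37 : n / 37 = p ^ k0 := by rw [← h37, hdivp]
            rw [hdiv37, ihget (p ^ k0) (by have := hppow_lt k0 (by omega); omega),
              if_pos ⟨by have := hppow_pos k0; omega,
                by have := hppow_lt k0 (by omega); omega⟩,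
              pvF_pow p k0 hmf, hnfac, pvF_pow p (k0 + 1) hmf, h37,
              pvApkF_37 (k0 + 1), pvApkF_37 k0, pow_succ]
            ring
          · rw [if_neg h37]
            have hdivpp : n / p / p = p ^ (k0 - 1) := by
              rw [hdivp]
              have : p ^ k0 = p ^ (k0 - 1) * p := by
                rw [← pow_succ]
                congr 1
                omega
              rw [this, Nat.mul_div_cancel _ (by omega)]
            have hp_lt : p < n := by
              have := hppow_lt 1 (by omega)
              rwa [pow_one] at this
            rw [hdivpp, hdivp,
              ihget p (by omega), ihget (p ^ k0) (by have := hppow_lt k0 (by omega); omega),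
              ihget (p ^ (k0 - 1)) (by have := hppow_lt (k0 - 1) (by omega); omega),
              if_pos ⟨by omega, by omega⟩,
              if_pos ⟨by have := hppow_pos k0; omega,
                by have := hppow_lt k0 (by omega); omega⟩,
              if_pos ⟨by have := hppow_pos (k0 - 1); omega,
                by have := hppow_lt (k0 - 1) (by omega); omega⟩,
              pvF_prime p hmf, pvF_pow p k0 hmf, pvF_pow p (k0 - 1) hmf,
              hnfac, pvF_pow p (k0 + 1) hmf]
            have hke : k0 + 1 = (k0 - 1) + 2 := by omega
            rw [hke]
            show _ = pvApkF p ((k0 - 1) + 2)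
            simp only [pvApkF]
            rw [if_neg h37]
            have hke2 : k0 - 1 + 1 = k0 := by omega
            rw [hke2]
    refine ⟨by rw [List.length_set, ihlen], ?_⟩
    intro j hj
    by_cases hje : j = n
    · subst hje
      rw [List.getD_eq_getElem?_getD, List.getElem?_set_self (by rw [ihlen]; omega),
        Option.getD_some, hval, if_pos (by omega)]
    · rw [List.getD_eq_getElem?_getD, List.getElem?_set_ne (by omega),
        ← List.getD_eq_getElem?_getD, ihget j hj]
      have hiff : (1 ≤ j ∧ j ≤ c + 1) ↔ (1 ≤ j ∧ j ≤ c + 1 + 1) := by omega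
      rw [if_congr hiff rfl rfl]

lemma pvBalt_eq (N : Nat) (hN : 1 ≤ N) :
    ∀ j, ((List.range' 2 (N + 1 - 2)).foldl (fun an n =>
      let p := ((List.range' 2 (N + 1 - 2)).foldl (fun s n => s.set n (pvBsf n))
        (List.replicate (N + 1) 0)).getD n 0
      let qm := pvBextract p n p (n / p)
      an.set n (
        if 1 < qm.2 then an.getD qm.1 0 * an.getD qm.2 0
        else if qm.1 = p then pvApB p
        else if p = 37 then - an.getD (n / 37) 0
        else an.getD p 0 * an.getD (n / p) 0 - (p : Int) * an.getD (n / p / p) 0))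
      ((List.replicate (N + 1) (0 : Int)).set 1 1))[j]? =
      if j ≤ N then some (if j = 0 then 0 else pvF j) else none := by
  intro j
  have hc : N + 1 - 2 = N - 1 := by omega
  rw [hc]
  obtain ⟨hlen, hget⟩ := pvBalt_inv N hN (N - 1) le_rfl
  rw [hc] at hlen hget
  by_cases hj : j ≤ N
  · rw [if_pos hj]
    have hjl := lt_of_lt_of_eq (show j < N + 1 by omega) hlen.symm
    have hv := hget j hj
    rw [List.getD_eq_getElem _ _ hjl] at hv
    rw [List.getElem?_eq_getElem hjl, hv]
    congr 1
    by_cases h0 : j = 0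
    · subst h0
      rw [if_neg (by omega), if_pos rfl]
    · rw [if_pos (by omega), if_neg h0]
  · rw [if_neg hj, List.getElem?_eq_none (by rw [hlen]; omega)]

-- ===== VERDICT (by name: the statement is the Claim_ definition above) =====
theorem compute_an_table_spec : Claim_equal_compute_an_table := by
  intro n_max _ hpre
  unfold Spec_compute_an_table compute_an_table compute_an_table_alt
  have hN : 1 ≤ n_max.toNat := by unfold Pre_compute_an_table at hpre; omega
  apply List.ext_getElem?
  intro j
  rw [pvA_eq n_max.toNat hN j, pvBalt_eq n_max.toNat hN j]
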